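-- pv_equiv track=rewrite | github.com/jgbaldwinbrown/jgbutils | Baldwin-Brown_2020_Ccol_genome/analysis/ann/easy/fachrlens_sorted.py | sorted_chrlens
-- ===== SOURCE A (Python) =====
-- def sorted_chrlens(chrlens):
--     s = sorted(chrlens, key=lambda x: x["len"], reverse=True)
--     cumsum = 0
--     for i, chrentry in enumerate(s):
--         chrentry["index"] = i
--         chrentry["index_1"] = i+1
--         cumsum += chrentry["len"]
--         chrentry["cumsum"] = cumsum
--     return(s)
-- ===== SOURCE B (Python) =====
-- def _prefix_sums(vals):
--     totals = []
--     t = 0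
--     for v in vals:
--         t += v
--         totals.append(t)
--     return totals
--
--
-- def sorted_chrlens(chrlens):
--     s = sorted(chrlens, key=lambda x: x["len"], reverse=True)
--     prefix = _prefix_sums([e["len"] for e in s])
--     for i, (chrentry, total) in enumerate(zip(s, prefix)):
--         chrentry["index"] = i
--         chrentry["index_1"] = i + 1
--         chrentry["cumsum"] = total
--     return s
-- ===== Notes on version B (the rewrite author's own statement) =====
-- stated objective: idiomatic
-- what changed: B first materialises a prefix-sum table of the sorted lengths in a separate pass and then annotates each entry by zipping it with that table, instead of threading a running cumsum accumulator through the annotation loop.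
import Mathlib
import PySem

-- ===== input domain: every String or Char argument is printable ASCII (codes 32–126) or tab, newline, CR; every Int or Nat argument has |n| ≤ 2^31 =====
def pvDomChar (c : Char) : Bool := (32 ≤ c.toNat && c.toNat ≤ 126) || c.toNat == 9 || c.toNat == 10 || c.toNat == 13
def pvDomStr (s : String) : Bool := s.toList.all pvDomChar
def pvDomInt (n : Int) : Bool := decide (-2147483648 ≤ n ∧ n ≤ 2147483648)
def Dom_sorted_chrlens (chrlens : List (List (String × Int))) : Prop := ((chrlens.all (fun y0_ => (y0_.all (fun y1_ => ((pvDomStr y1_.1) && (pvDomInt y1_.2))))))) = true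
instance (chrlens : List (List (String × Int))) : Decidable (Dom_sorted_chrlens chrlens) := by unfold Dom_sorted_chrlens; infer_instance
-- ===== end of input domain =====

-- B replaces A's running-cumsum annotation loop with a precomputed prefix-sum table zipped against the
-- sorted list (more idiomatic, same cost). Both mutate the input dicts in place in Python; the proved
-- equivalence is about the returned value.

-- ===== PORT A =====
def sorted_chrlens (chrlens : List (List (String × Int))) : List (List (String × Int)) :=
  let s := PySem.List.sorted chrlens (fun x => (PySem.Dict.mk x).getD "len" 0) true
  ((PySem.List.enumerate s).foldl
    (fun (st : Int × List (List (String × Int))) p =>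
      let d1 := (PySem.Dict.mk p.2).insert "index" p.1
      let d2 := d1.insert "index_1" (p.1 + 1)
      let c := st.1 + d2.getD "len" 0
      (c, st.2 ++ [(d2.insert "cumsum" c).items]))
    (0, [])).2

-- ===== PORT B =====
-- port of Source B's _prefix_sums (loop with a running total, appending to totals)
def prefixSums (vals : List Int) : List Int :=
  (vals.foldl (fun (st : Int × List Int) v => (st.1 + v, st.2 ++ [st.1 + v])) (0, [])).2

def sorted_chrlens_alt (chrlens : List (List (String × Int))) : List (List (String × Int)) :=
  let s := PySem.List.sorted chrlens (fun x => (PySem.Dict.mk x).getD "len" 0) true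
  let pre := prefixSums (s.map (fun e => (PySem.Dict.mk e).getD "len" 0))
  (PySem.List.enumerate (s.zip pre)).map (fun p =>
    ((((PySem.Dict.mk p.2.1).insert "index" p.1).insert "index_1" (p.1 + 1)).insert "cumsum" p.2.2).items)

-- ===== PRECONDITION & SPEC =====
-- Pre_ excludes dicts missing the key "len" (Python A raises KeyError there) and association lists with
-- duplicate keys, which do not arise from a Python dict.
def Pre_sorted_chrlens (chrlens : List (List (String × Int))) : Prop :=
  ∀ d ∈ chrlens, (d.map Prod.fst).Nodup ∧ "len" ∈ d.map Prod.fst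
instance (chrlens : List (List (String × Int))) : Decidable (Pre_sorted_chrlens chrlens) := by
  unfold Pre_sorted_chrlens; infer_instance
def pvWitness_sorted_chrlens : (List (List (String × Int))) := [[("len", 5)], [("len", 2), ("name", 7)]]

def Spec_sorted_chrlens (chrlens : List (List (String × Int))) (out : List (List (String × Int))) : Prop := out = sorted_chrlens_alt chrlens
instance (chrlens : List (List (String × Int))) (out : List (List (String × Int))) : Decidable (Spec_sorted_chrlens chrlens out) := by unfold Spec_sorted_chrlens; infer_instance

-- ===== CLAIM (what is proved, stated in full; the proofs are below) =====
def Claim_equal_sorted_chrlens : Prop := ∀ (chrlens : List (List (String × Int))), Dom_sorted_chrlens chrlens → Pre_sorted_chrlens chrlens → Spec_sorted_chrlens chrlens (sorted_chrlens chrlens)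

-- ===== LEMMAS AND PROOFS =====

-- the per-entry annotation both programs perform, at index i with cumulative sum c
def annot (e : List (String × Int)) (i c : Int) : List (String × Int) :=
  ((((PySem.Dict.mk e).insert "index" i).insert "index_1" (i + 1)).insert "cumsum" c).items

def accum : List Int → Int → List Int
  | [], _ => []
  | v :: rest, t => (t + v) :: accum rest (t + v)

lemma prefixSums_foldl (vals : List Int) : ∀ (t : Int) (acc : List Int),
    (vals.foldl (fun (st : Int × List Int) v => (st.1 + v, st.2 ++ [st.1 + v])) (t, acc)).2
      = acc ++ accum vals t := by
  induction vals with
  | nil => intro t acc; simp [accum]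
  | cons v rest ih => intro t acc; simp [List.foldl, accum, ih]

lemma len_after_inserts (e : List (String × Int)) (i : Int) :
    ((((PySem.Dict.mk e).insert "index" i).insert "index_1" (i + 1)).getD "len" 0)
      = (PySem.Dict.mk e).getD "len" 0 := by
  rw [PySem.Dict.getD_insert_of_ne _ _ _ (by decide),
      PySem.Dict.getD_insert_of_ne _ _ _ (by decide)]

lemma loop_eq (s : List (List (String × Int))) : ∀ (i c : Int) (acc : List (List (String × Int))),
    ((PySem.List.enumerate s i).foldl
      (fun (st : Int × List (List (String × Int))) p =>
        let d1 := (PySem.Dict.mk p.2).insert "index" p.1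
        let d2 := d1.insert "index_1" (p.1 + 1)
        let c := st.1 + d2.getD "len" 0
        (c, st.2 ++ [(d2.insert "cumsum" c).items]))
      (c, acc)).2
    = acc ++ (PySem.List.enumerate (s.zip (accum (s.map (fun e => (PySem.Dict.mk e).getD "len" 0)) c)) i).map
        (fun p => annot p.2.1 p.1 p.2.2) := by
  induction s with
  | nil => intro i c acc; simp [PySem.List.enumerate_nil]
  | cons e rest ih =>
      intro i c acc
      rw [PySem.List.enumerate_cons]
      simp only [List.foldl_cons, List.map_cons, accum, List.zip_cons_cons,
        PySem.List.enumerate_cons, List.map]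
      rw [ih, len_after_inserts]
      simp [annot, List.append_assoc]

-- ===== VERDICT (by name: the statement is the Claim_ definition above) =====
theorem sorted_chrlens_spec : Claim_equal_sorted_chrlens := by
  intro chrlens _ _
  unfold Spec_sorted_chrlens sorted_chrlens sorted_chrlens_alt
  simp only [prefixSums, prefixSums_foldl, List.nil_append]
  rw [loop_eq]
  simp [annot]
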